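-- pv_equiv track=rewrite | github.com/liyu0x/cryptosmt | backup/and_bct.py | general_and_operation
-- ===== SOURCE A (Python) =====
-- def general_and_operation(x: int, involve_bits_length: int):
--     bit_extraction = 0
--     for _ in range(involve_bits_length + 1):
--         bit_extraction <<= 1
--         bit_extraction |= 0b1
--     a0 = x & bit_extraction
--     a1 = x >> involve_bits_length & bit_extraction
--
--     # temp
--     # a0 = x & 0x11
--     # a1 = x >> 2 & 0x11
--     return a0 & a1
-- ===== SOURCE B (Python) =====
-- def general_and_operation(x: int, involve_bits_length: int):
--     combined = x & (x >> involve_bits_length)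
--     return combined % (1 << (involve_bits_length + 1))
-- ===== Notes on version B (the rewrite author's own statement) =====
-- stated objective: faster
-- what changed: B drops the mask-building loop and the two separate masked extractions entirely: it ANDs x with its shifted self once and reduces the result with a single floor-mod by 1 << (involve_bits_length + 1), replacing A's O(n) shift-and-or mask loop plus three bitwise ANDs.
import Mathlib
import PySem

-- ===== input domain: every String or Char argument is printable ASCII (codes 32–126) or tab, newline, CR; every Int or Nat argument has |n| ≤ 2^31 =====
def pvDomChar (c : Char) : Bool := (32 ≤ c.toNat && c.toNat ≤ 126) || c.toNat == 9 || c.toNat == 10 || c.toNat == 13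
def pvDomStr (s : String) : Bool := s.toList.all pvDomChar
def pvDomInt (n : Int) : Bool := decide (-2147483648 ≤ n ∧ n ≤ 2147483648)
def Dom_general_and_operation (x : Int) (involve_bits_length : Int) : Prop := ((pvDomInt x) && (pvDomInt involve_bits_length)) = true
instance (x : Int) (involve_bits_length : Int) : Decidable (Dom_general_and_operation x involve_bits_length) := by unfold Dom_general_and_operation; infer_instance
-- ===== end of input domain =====

-- B replaces A's mask-building loop and double masked extraction with a single
-- AND of x against its shifted self followed by one floor-mod (objective: simpler).

-- ===== PORT A =====
-- A builds the mask by folding `bit_extraction = (bit_extraction << 1) | 1` over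
-- range(involve_bits_length + 1); shift counts use .toNat, exact under Pre_ (n ≥ 0).
def general_and_operation (x : Int) (involve_bits_length : Int) : Int :=
  let bit_extraction : Int :=
    (PySem.List.pyRange 0 (involve_bits_length + 1) 1).foldl
      (fun acc _ => PySem.Int.bor (acc <<< (1 : Nat)) 1) 0
  let a0 := PySem.Int.band x bit_extraction
  let a1 := PySem.Int.band (x >>> involve_bits_length.toNat) bit_extraction
  PySem.Int.band a0 a1

-- ===== PORT B =====
-- Source B: combined = x & (x >> involve_bits_length); combined % (1 << (involve_bits_length + 1))
def general_and_operation_alt (x : Int) (involve_bits_length : Int) : Int :=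
  let combined : Int := PySem.Int.band x (x >>> involve_bits_length.toNat)
  PySem.Int.mod combined ((1 : Int) <<< (involve_bits_length + 1).toNat)

-- ===== PRECONDITION & SPEC =====
-- Both Pythons raise ValueError (negative shift count) when involve_bits_length < 0.
def Pre_general_and_operation (x : Int) (involve_bits_length : Int) : Prop :=
  0 ≤ involve_bits_length
instance (x : Int) (involve_bits_length : Int) : Decidable (Pre_general_and_operation x involve_bits_length) := by unfold Pre_general_and_operation; infer_instance
def pvWitness_general_and_operation : Int × Int := (13, 2)

def Spec_general_and_operation (x : Int) (involve_bits_length : Int) (out : Int) : Prop := out = general_and_operation_alt x involve_bits_length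
instance (x : Int) (involve_bits_length : Int) (out : Int) : Decidable (Spec_general_and_operation x involve_bits_length out) := by unfold Spec_general_and_operation; infer_instance

-- ===== CLAIM (what is proved, stated in full; the proofs are below) =====
def Claim_equal_general_and_operation : Prop := ∀ (x : Int) (involve_bits_length : Int), Dom_general_and_operation x involve_bits_length → Pre_general_and_operation x involve_bits_length → Spec_general_and_operation x involve_bits_length (general_and_operation x involve_bits_length)

-- ===== LEMMAS AND PROOFS =====

lemma two_mul_lor_one (m : Nat) : 2 * m ||| 1 = 2 * m + 1 := by
  have h := Nat.lor_bit false m true 0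
  simpa [Nat.bit_false_apply, Nat.bit_true_apply] using h

-- one loop step: a mask of k low ones shifted left and or-ed with 1 has k+1 low ones
lemma mask_step (k : Nat) :
    PySem.Int.bor ((((2:Int)^k - 1) <<< (1:Nat))) 1 = 2 ^ (k+1) - 1 := by
  have h1 : (1:Nat) ≤ 2^k := Nat.one_le_two_pow
  have ha : (((2:Int)^k - 1) <<< (1:Nat)) = ((2 * (2^k - 1) : Nat) : Int) := by
    rw [Int.shiftLeft_eq]
    push_cast [h1]; ring
  rw [ha, PySem.Int.bor_of_nonneg (by positivity) (by norm_num)]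
  simp only [Int.toNat_natCast, Int.toNat_one, two_mul_lor_one]
  push_cast [h1]; ring

-- the whole loop: folding the step over any list of length L turns 2^k-1 into 2^(k+L)-1
lemma mask_fold (l : List Int) (k : Nat) :
    l.foldl (fun acc _ => PySem.Int.bor (acc <<< (1 : Nat)) 1) ((2 : Int) ^ k - 1)
      = 2 ^ (k + l.length) - 1 := by
  induction l generalizing k with
  | nil => simp
  | cons h t ih =>
      simp only [List.foldl_cons, List.length_cons, mask_step k, ih (k + 1)]
      ring_nf

-- disjoint subtraction is bitwise difference: m - (m &&& q) = m.ldiff q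
lemma sub_and_eq_ldiff (m q : Nat) : m - (m &&& q) = m.ldiff q := by
  induction m using Nat.strong_induction_on generalizing q with
  | _ m ih =>
    rcases Nat.eq_zero_or_pos m with hm | hm
    · subst hm
      have : Nat.ldiff 0 q = 0 := by
        apply Nat.eq_of_testBit_eq
        intro i
        simp [Nat.testBit_ldiff]
      simp [this]
    · have ihh := ih (m / 2) (Nat.div_lt_self hm (by norm_num)) (q / 2)
      have hA2 : (m &&& q) / 2 = (m / 2) &&& (q / 2) := Nat.and_div_two
      have hL2 : (m.ldiff q) / 2 = (m / 2).ldiff (q / 2) := by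
        have := @Nat.bitwise_div_two_pow (fun a b => a && !b) m q 1 rfl
        simpa [Nat.pow_one, Nat.ldiff] using this
      have ta : (m &&& q).testBit 0 = (m.testBit 0 && q.testBit 0) := Nat.testBit_and m q 0
      have tl : (m.ldiff q).testBit 0 = (m.testBit 0 && !q.testBit 0) := Nat.testBit_ldiff m q 0
      have hle : (m / 2) &&& (q / 2) ≤ m / 2 := Nat.and_le_left
      have e1 : m = 2 * (m / 2) + m % 2 := (Nat.div_add_mod m 2).symm.trans (by ring)
      have e2 : (m &&& q) = 2 * ((m / 2) &&& (q / 2)) + (m &&& q) % 2 := by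
        rw [← hA2]; exact (Nat.div_add_mod _ 2).symm.trans (by ring)
      have e3 : (m.ldiff q) = 2 * ((m / 2).ldiff (q / 2)) + (m.ldiff q) % 2 := by
        rw [← hL2]; exact (Nat.div_add_mod _ 2).symm.trans (by ring)
      have convT : ∀ v : Nat, v.testBit 0 = true → v % 2 = 1 :=
        fun v h => Nat.mod_two_eq_one_iff_testBit_zero.mpr h
      have convF : ∀ v : Nat, v.testBit 0 = false → v % 2 = 0 := by
        intro v h
        have hne : v % 2 ≠ 1 := by
          intro hc
          rw [Nat.mod_two_eq_one_iff_testBit_zero.mp hc] at h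
          simp at h
        have hlt : v % 2 < 2 := Nat.mod_lt _ (by norm_num)
        omega
      cases hmb : m.testBit 0 with
      | true =>
        have pm := convT _ hmb
        cases hqb : q.testBit 0 with
        | true =>
          have pa := convT (m &&& q) (by simp [ta, hmb, hqb])
          have pl := convF (m.ldiff q) (by simp [tl, hmb, hqb])
          omega
        | false =>
          have pa := convF (m &&& q) (by simp [ta, hqb])
          have pl := convT (m.ldiff q) (by simp [tl, hmb, hqb])
          omega
      | false =>
        have pm := convF _ hmb
        have pa := convF (m &&& q) (by simp [ta, hmb])
        have pl := convF (m.ldiff q) (by simp [tl, hmb])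
        omega

-- emod of a negative number by 2^k, as a Nat literal
lemma emod_negSucc (k q : Nat) :
    (Int.negSucc q) % ((2 ^ k : Nat) : Int) = ((2 ^ k - 1 - q % 2 ^ k : Nat) : Int) := by
  have hMpos : 0 < 2 ^ k := Nat.two_pow_pos k
  have hr : q % 2 ^ k < 2 ^ k := Nat.mod_lt _ hMpos
  have hdm : 2 ^ k * (q / 2 ^ k) + q % 2 ^ k = q := Nat.div_add_mod q (2 ^ k)
  have hq : (q : Int) = (2 ^ k : Nat) * (q / 2 ^ k : Nat) + (q % 2 ^ k : Nat) := by
    exact_mod_cast hdm.symm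
  have h1 : (Int.negSucc q) =
      (((2 ^ k : Nat) : Int) - 1 - (q % 2 ^ k : Nat)) +
        ((2 ^ k : Nat) : Int) * (-((q / 2 ^ k : Nat) : Int) - 1) := by
    rw [Int.negSucc_eq, hq]; ring
  rw [h1, Int.add_mul_emod_self_left, Int.emod_eq_of_lt (by omega) (by omega)]
  omega

-- the four bitwise residue identities (Nat level)
lemma nat_case1 (k m p : Nat) :
    (m % 2 ^ k) &&& (p % 2 ^ k) = (m &&& p) % 2 ^ k := by
  apply Nat.eq_of_testBit_eq
  intro i
  by_cases h : i < k <;> simp [Nat.testBit_and, Nat.testBit_mod_two_pow, h]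

lemma nat_case2 (k m q : Nat) :
    (m % 2 ^ k) &&& (2 ^ k - 1 - q % 2 ^ k) = (m - (m &&& q)) % 2 ^ k := by
  rw [sub_and_eq_ldiff]
  have hMpos : 0 < 2 ^ k := Nat.two_pow_pos k
  have hr : q % 2 ^ k < 2 ^ k := Nat.mod_lt _ hMpos
  have h1 : 2 ^ k - 1 - q % 2 ^ k = 2 ^ k - (q % 2 ^ k + 1) := by omega
  rw [h1]
  apply Nat.eq_of_testBit_eq
  intro i
  rw [Nat.testBit_and, Nat.testBit_two_pow_sub_succ hr]
  by_cases h : i < k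
  · simp only [Nat.testBit_mod_two_pow, Nat.testBit_ldiff, h, decide_true, Bool.true_and]
  · simp [Nat.testBit_mod_two_pow, Nat.testBit_ldiff, h]

lemma nat_case4 (k m q : Nat) :
    (2 ^ k - 1 - m % 2 ^ k) &&& (2 ^ k - 1 - q % 2 ^ k) = 2 ^ k - 1 - (m ||| q) % 2 ^ k := by
  have hMpos : 0 < 2 ^ k := Nat.two_pow_pos k
  have hrm : m % 2 ^ k < 2 ^ k := Nat.mod_lt _ hMpos
  have hrq : q % 2 ^ k < 2 ^ k := Nat.mod_lt _ hMpos
  have hro : (m ||| q) % 2 ^ k < 2 ^ k := Nat.mod_lt _ hMpos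
  have h1 : 2 ^ k - 1 - m % 2 ^ k = 2 ^ k - (m % 2 ^ k + 1) := by omega
  have h2 : 2 ^ k - 1 - q % 2 ^ k = 2 ^ k - (q % 2 ^ k + 1) := by omega
  have h3 : 2 ^ k - 1 - (m ||| q) % 2 ^ k = 2 ^ k - ((m ||| q) % 2 ^ k + 1) := by omega
  rw [h1, h2, h3]
  apply Nat.eq_of_testBit_eq
  intro i
  rw [Nat.testBit_and, Nat.testBit_two_pow_sub_succ hrm,
    Nat.testBit_two_pow_sub_succ hrq, Nat.testBit_two_pow_sub_succ hro]
  by_cases h : i < k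
  · simp only [Nat.testBit_mod_two_pow, Nat.testBit_or, h, decide_true, Bool.true_and]
    all_goals cases m.testBit i <;> cases q.testBit i <;> simp
  · simp [h]

-- PySem band on each pair of signs, as Nat expressions
lemma neg_negSucc_sub_one (q : Nat) : (-(Int.negSucc q) - 1) = (q : Int) := by
  rw [Int.negSucc_eq]; ring

lemma not_nonneg_negSucc (q : Nat) : ¬ (0 : Int) ≤ Int.negSucc q := by
  rw [Int.negSucc_eq]; omega

lemma band_nat_neg (m q : Nat) :
    PySem.Int.band ((m : Nat) : Int) (Int.negSucc q) = ((m - (m &&& q) : Nat) : Int) := by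
  rw [PySem.Int.band, if_pos (Int.natCast_nonneg m), if_neg (not_nonneg_negSucc q),
    neg_negSucc_sub_one, Int.toNat_natCast, Int.toNat_natCast]

lemma band_neg_nat (q b : Nat) :
    PySem.Int.band (Int.negSucc q) ((b : Nat) : Int) = ((b - (b &&& q) : Nat) : Int) := by
  rw [PySem.Int.band, if_neg (not_nonneg_negSucc q), if_pos (Int.natCast_nonneg b),
    neg_negSucc_sub_one, Int.toNat_natCast, Int.toNat_natCast]

lemma band_neg_neg (m q : Nat) :
    PySem.Int.band (Int.negSucc m) (Int.negSucc q) = Int.negSucc (m ||| q) := by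
  rw [PySem.Int.band, if_neg (not_nonneg_negSucc m), if_neg (not_nonneg_negSucc q),
    neg_negSucc_sub_one, neg_negSucc_sub_one, Int.toNat_natCast, Int.toNat_natCast,
    Int.negSucc_eq]
  ring

-- masking by 2^k-1 on the Python side, per sign of the argument
lemma band_mask_nat (k m : Nat) :
    PySem.Int.band ((m : Nat) : Int) (((2 ^ k - 1 : Nat) : Int)) = ((m % 2 ^ k : Nat) : Int) := by
  rw [PySem.Int.band_natCast, Nat.and_two_pow_sub_one_eq_mod]

lemma band_mask_neg (k q : Nat) :
    PySem.Int.band (Int.negSucc q) (((2 ^ k - 1 : Nat) : Int))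
      = ((2 ^ k - 1 - q % 2 ^ k : Nat) : Int) := by
  rw [band_neg_nat, Nat.and_comm, Nat.and_two_pow_sub_one_eq_mod]

-- the master identity: masked AND of masked extractions = floor-mod of the AND
lemma band_mask_band (x y : Int) (k : Nat) :
    PySem.Int.band (PySem.Int.band x (((2 ^ k - 1 : Nat) : Int)))
        (PySem.Int.band y (((2 ^ k - 1 : Nat) : Int)))
      = PySem.Int.mod (PySem.Int.band x y) (((2 ^ k : Nat) : Int)) := by
  have hMpos : (0 : Int) < ((2 ^ k : Nat) : Int) := by
    exact_mod_cast Nat.two_pow_pos k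
  rw [PySem.Int.mod_eq_emod_of_pos hMpos]
  cases x with
  | ofNat m =>
    rw [show (Int.ofNat m) = ((m : Nat) : Int) from rfl]
    cases y with
    | ofNat p =>
      rw [show (Int.ofNat p) = ((p : Nat) : Int) from rfl]
      rw [band_mask_nat, band_mask_nat, PySem.Int.band_natCast, PySem.Int.band_natCast,
        ← Int.natCast_mod]
      exact_mod_cast nat_case1 k m p
    | negSucc q =>
      rw [band_mask_nat, band_mask_neg, PySem.Int.band_natCast, band_nat_neg,
        ← Int.natCast_mod]
      exact_mod_cast nat_case2 k m q
  | negSucc m =>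
    cases y with
    | ofNat p =>
      rw [show (Int.ofNat p) = ((p : Nat) : Int) from rfl]
      rw [band_mask_neg, band_mask_nat, PySem.Int.band_natCast, band_neg_nat,
        ← Int.natCast_mod]
      rw [Nat.and_comm]
      exact_mod_cast nat_case2 k p m
    | negSucc q =>
      rw [band_mask_neg, band_mask_neg, PySem.Int.band_natCast, band_neg_neg, emod_negSucc]
      exact_mod_cast nat_case4 k m q

-- ===== VERDICT (by name: the statement is the Claim_ definition above) =====
theorem general_and_operation_spec : Claim_equal_general_and_operation := by
  intro x n _ hn
  unfold Spec_general_and_operation general_and_operation general_and_operation_alt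
  have hfold := mask_fold (PySem.List.pyRange 0 (n + 1) 1) 0
  rw [PySem.List.length_pyRange_one] at hfold
  norm_num at hfold
  have h1 : (1:Nat) ≤ 2 ^ (n + 1).toNat := Nat.one_le_two_pow
  have hmask : ((2:Int) ^ (n + 1).toNat - 1) = ((2 ^ (n + 1).toNat - 1 : Nat) : Int) := by
    push_cast [h1]; ring
  have hmod : ((1 : Int) <<< (n + 1).toNat) = ((2 ^ (n + 1).toNat : Nat) : Int) := by
    rw [Int.shiftLeft_eq]; push_cast; ring
  simp only [hfold, hmask, hmod]
  exact band_mask_band x (x >>> n.toNat) (n + 1).toNat
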